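-- pv_equiv track=rewrite | github.com/smahm006/leetcode | 552_student_attendance_record_II/main.py | consecutivelyLate
-- ===== SOURCE A (Python) =====
-- def consecutivelyLate(att: list[str]) -> bool:
--     late_count = 0
--     for day in att:
--         if day == "L":
--             late_count += 1
--         else:
--             late_count = 0
--     if late_count >= 3:
--         return True
--     return False
-- ===== SOURCE B (Python) =====
-- def consecutivelyLate(att: list[str]) -> bool:
--     count = 0
--     for day in reversed(att):
--         if day == "L":
--             count += 1
--         else:
--             break
--     return count >= 3
-- ===== Notes on version B (the rewrite author's own statement) =====
-- stated objective: alternative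
-- what changed: Replaces the forward scan-and-reset counter over the whole list with a reverse iteration that counts trailing 'L's and breaks at the first non-'L'.
import Mathlib
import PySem

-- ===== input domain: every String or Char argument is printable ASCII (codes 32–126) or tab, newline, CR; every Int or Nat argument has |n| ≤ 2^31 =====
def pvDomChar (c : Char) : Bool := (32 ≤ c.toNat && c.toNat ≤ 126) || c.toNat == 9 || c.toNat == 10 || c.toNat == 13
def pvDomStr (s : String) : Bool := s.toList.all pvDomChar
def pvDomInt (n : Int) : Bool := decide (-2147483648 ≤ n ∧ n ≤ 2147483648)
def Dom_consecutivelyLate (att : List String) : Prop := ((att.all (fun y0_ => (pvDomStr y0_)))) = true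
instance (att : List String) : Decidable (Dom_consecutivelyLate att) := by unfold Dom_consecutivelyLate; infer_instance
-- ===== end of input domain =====

-- B replaces A's forward scan-and-reset counter with a reverse scan that counts
-- trailing "L"s and stops at the first non-"L" (alternative decomposition).


-- ===== PORT A =====
-- late_count accumulated by a forward fold; +1 on "L", reset to 0 otherwise.
def consecutivelyLate (att : List String) : Bool :=
  let late_count : Int :=
    att.foldl (fun c day => if day == "L" then c + 1 else 0) 0
  if late_count ≥ 3 then true else false

-- ===== PORT B =====
-- count the leading "L"s of the reversed list (break at the first non-"L").
def pvLeadL : List String → Int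
  | [] => 0
  | d :: rest => if d == "L" then 1 + pvLeadL rest else 0

def consecutivelyLate_alt (att : List String) : Bool :=
  decide (pvLeadL att.reverse ≥ 3)

-- ===== PRECONDITION & SPEC =====
def Spec_consecutivelyLate (att : List String) (out : Bool) : Prop := out = consecutivelyLate_alt att
instance (att : List String) (out : Bool) : Decidable (Spec_consecutivelyLate att out) := by unfold Spec_consecutivelyLate; infer_instance

-- ===== CLAIM (what is proved, stated in full; the proofs are below) =====
def Claim_equal_consecutivelyLate : Prop := ∀ (att : List String), Dom_consecutivelyLate att → Spec_consecutivelyLate att (consecutivelyLate att)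

-- ===== LEMMAS AND PROOFS =====

theorem pvFold_eq (att : List String) (c : Int) :
    att.foldl (fun c day => if day == "L" then c + 1 else 0) c
      = pvLeadL att.reverse + (if att.all (· == "L") then c else 0) := by
  induction att using List.reverseRecOn generalizing c with
  | nil => simp [pvLeadL]
  | append_singleton xs d ih =>
    rw [List.foldl_append]
    simp only [List.foldl_cons, List.foldl_nil, List.reverse_append,
      List.reverse_singleton, List.singleton_append, pvLeadL, List.all_append,
      List.all_cons, List.all_nil]
    by_cases hd : d == "L"
    · simp only [hd, if_true, ih]
      cases h : xs.all (· == "L") <;> simp [h] <;> ring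
    · simp [hd]

-- ===== VERDICT (by name: the statement is the Claim_ definition above) =====
theorem consecutivelyLate_spec : Claim_equal_consecutivelyLate := by
  intro att _
  unfold Spec_consecutivelyLate consecutivelyLate consecutivelyLate_alt
  rw [pvFold_eq]
  cases h : att.all (· == "L")
  · simp
  · simp
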